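-- pv_equiv track=rewrite | github.com/Low-ResourceDialectology/TextAsCorpusRep | scr/datasets/utilities.py | get_words_min_and_length
-- ===== SOURCE A (Python) =====
-- def get_words_min_and_length(input_data):
--     words = []
--     for line in input_data:
--         word_list = line.split()
--         for word in word_list:
--             words.append(word)
--     min_word = min(words, key=len)
--     min_word_length = len(min_word)
--     return min_word, min_word_length
-- ===== SOURCE B (Python) =====
-- def get_words_min_and_length(input_data):
--     min_word = None
--     for line in input_data:
--         for word in line.split():
--             if min_word is None or len(word) < len(min_word):
--                 min_word = word
--     if min_word is None:
--         raise ValueError("min() arg is an empty sequence")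
--     return min_word, len(min_word)
-- ===== Notes on version B (the rewrite author's own statement) =====
-- stated objective: simpler
-- what changed: B drops the intermediate words list and computes the minimum online in a single pass over the lines, keeping only the current best word (strict < preserves min's first-occurrence tie-breaking).
import Mathlib
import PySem

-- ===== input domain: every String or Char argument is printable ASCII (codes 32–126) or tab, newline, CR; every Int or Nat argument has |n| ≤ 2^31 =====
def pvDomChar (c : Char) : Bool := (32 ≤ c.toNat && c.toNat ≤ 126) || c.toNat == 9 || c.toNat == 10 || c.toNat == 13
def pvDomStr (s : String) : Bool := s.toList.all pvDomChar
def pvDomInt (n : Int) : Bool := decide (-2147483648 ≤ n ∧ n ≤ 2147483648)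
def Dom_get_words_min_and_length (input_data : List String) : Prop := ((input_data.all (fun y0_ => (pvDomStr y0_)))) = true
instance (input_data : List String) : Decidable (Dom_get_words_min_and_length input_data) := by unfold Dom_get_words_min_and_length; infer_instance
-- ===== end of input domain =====

-- B computes the minimum-length word in one online pass (running best) instead of
-- collecting all words into a list and scanning it with min(key=len): simpler, O(1) extra space.


-- ===== PORT A =====
-- words = []; for line: for word in line.split(): words.append(word); min(words, key=len)
def get_words_min_and_length (input_data : List String) : String × Int :=
  let words : List String :=
    input_data.foldl
      (fun acc line => (PySem.Str.split₀ line).foldl (fun ws w => ws ++ [w]) acc) []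
  match PySem.List.min? words (fun w => PySem.Str.len w) with
  | some m => (m, PySem.Str.len m)
  | none => ("", 0)  -- min([]) raises ValueError in Python: excluded by Pre_

-- ===== PORT B =====
-- running best: replace only on strictly smaller length (first-occurrence tie-breaking)
def pvAltStep (best : Option String) (w : String) : Option String :=
  match best with
  | none => some w
  | some b => if PySem.Str.len w < PySem.Str.len b then some w else some b

def get_words_min_and_length_alt (input_data : List String) : String × Int :=
  let best : Option String :=
    input_data.foldl (fun acc line => (PySem.Str.split₀ line).foldl pvAltStep acc) none
  match best with
  | some m => (m, PySem.Str.len m)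
  | none => ("", 0)  -- Python B raises ValueError here: excluded by Pre_

-- ===== PRECONDITION & SPEC =====
-- Pre_ excludes inputs with no words at all, where A's min([]) (and B) raises ValueError.
def Pre_get_words_min_and_length (input_data : List String) : Prop :=
  ∃ s ∈ input_data, PySem.Str.split₀ s ≠ []
instance (input_data : List String) : Decidable (Pre_get_words_min_and_length input_data) := by
  unfold Pre_get_words_min_and_length; infer_instance

def pvWitness_get_words_min_and_length : List String := ["hi there", "", "a b"]

def Spec_get_words_min_and_length (input_data : List String) (out : String × Int) : Prop := out = get_words_min_and_length_alt input_data
instance (input_data : List String) (out : String × Int) : Decidable (Spec_get_words_min_and_length input_data out) := by unfold Spec_get_words_min_and_length; infer_instance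

-- ===== CLAIM (what is proved, stated in full; the proofs are below) =====
def Claim_equal_get_words_min_and_length : Prop := ∀ (input_data : List String), Dom_get_words_min_and_length input_data → Pre_get_words_min_and_length input_data → Spec_get_words_min_and_length input_data (get_words_min_and_length input_data)

-- ===== LEMMAS AND PROOFS =====

-- A's nested appends build exactly the flatMap of the per-line word lists.
lemma pvWordsA_eq_flatMap (input_data : List String) :
    input_data.foldl
      (fun acc line => (PySem.Str.split₀ line).foldl (fun ws w => ws ++ [w]) acc) []
      = input_data.flatMap PySem.Str.split₀ := by
  have h : ∀ (l : List String) (acc : List String),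
      l.foldl (fun acc line => (PySem.Str.split₀ line).foldl (fun ws w => ws ++ [w]) acc) acc
        = acc ++ l.flatMap PySem.Str.split₀ := by
    intro l
    induction l with
    | nil => intro acc; simp
    | cons x xs ih =>
        intro acc
        rw [List.foldl_cons, PySem.List.foldl_append_singleton, ih, List.flatMap_cons,
            List.append_assoc]
  simpa using h input_data []

-- B's nested fold is the fold of pvAltStep over the same flatMap.
lemma pvBestB_eq_fold_flatMap (input_data : List String) (init : Option String) :
    input_data.foldl (fun acc line => (PySem.Str.split₀ line).foldl pvAltStep acc) init
      = (input_data.flatMap PySem.Str.split₀).foldl pvAltStep init := by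
  induction input_data generalizing init with
  | nil => simp
  | cons x xs ih => simp [List.flatMap_cons, List.foldl_append, ih]

-- PySem's min? IS the pvAltStep fold started from none.
lemma pvMin?_eq_fold (ws : List String) :
    PySem.List.min? ws (fun w => PySem.Str.len w) = ws.foldl pvAltStep none := by
  unfold PySem.List.min?
  congr 1
  funext acc x
  cases acc <;> rfl

-- ===== VERDICT (by name: the statement is the Claim_ definition above) =====
theorem get_words_min_and_length_spec : Claim_equal_get_words_min_and_length := by
  intro input_data _ _
  unfold Spec_get_words_min_and_length get_words_min_and_length get_words_min_and_length_alt
  simp only [pvWordsA_eq_flatMap, pvBestB_eq_fold_flatMap, pvMin?_eq_fold]
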